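-- pv_equiv track=rewrite | github.com/OpenPecha/stam_annotator | src/stam_annotator/serializers/utility.py | add_newlines_around_hashes
-- ===== SOURCE A (Python) =====
-- from typing import List
--
-- def add_newlines_around_hashes(input_string):
--     lines = input_string.split("\n")
--
--     processed_lines: List[str] = []
--
--     for i, line in enumerate(lines):
--         if line.startswith("#"):
--             # Add a newline before the '#' line if the previous line is not already a newline
--             # and it's not the first line of the text
--             if i > 0 and processed_lines[-1] != "":
--                 processed_lines.append("")
--             processed_lines.append(line)
--             # Add a newline after the '#' line if it's not the last line and the next line is not already a newline
--             if i < len(lines) - 1 and lines[i + 1] != "":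
--                 processed_lines.append("")
--         else:
--             processed_lines.append(line)
--
--     # Join the processed lines back into a single string
--     output_string = "\n".join(processed_lines)
--     return output_string
-- ===== SOURCE B (Python) =====
-- def add_newlines_around_hashes(input_string):
--     lines = input_string.split("\n")
--     out = []
--     prev = None
--     for cur in lines:
--         if prev is not None and prev != "" and cur != "" and (prev.startswith("#") or cur.startswith("#")):
--             out.append("")
--         out.append(cur)
--         prev = cur
--     return "\n".join(out)
-- ===== Notes on version B (the rewrite author's own statement) =====
-- stated objective: simpler
-- what changed: Replaces A's asymmetric before/after insertions with processed_lines[-1] lookback state by a single symmetric test on each pair of adjacent original lines (insert one blank between prev and cur iff both are nonempty and either starts with '#').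
import Mathlib
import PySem

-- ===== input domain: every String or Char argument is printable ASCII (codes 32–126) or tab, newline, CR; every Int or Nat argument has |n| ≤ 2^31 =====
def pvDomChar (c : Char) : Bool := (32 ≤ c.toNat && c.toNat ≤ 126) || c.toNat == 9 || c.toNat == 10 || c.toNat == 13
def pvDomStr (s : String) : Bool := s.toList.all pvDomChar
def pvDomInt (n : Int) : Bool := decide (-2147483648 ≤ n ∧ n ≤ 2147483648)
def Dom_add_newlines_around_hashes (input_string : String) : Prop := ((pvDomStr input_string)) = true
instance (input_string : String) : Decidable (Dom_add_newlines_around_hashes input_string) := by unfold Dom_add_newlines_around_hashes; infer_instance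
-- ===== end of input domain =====

-- B replaces A's asymmetric before/after blank insertions (with processed_lines[-1] lookback state)
-- by one symmetric per-boundary test on adjacent original lines; objective: simpler.

-- ===== PORT A =====
-- loop body of A's for-loop, kept as a named helper (captures `lines` like the Python loop reads the local)
def pvStepA (lines : List String) (processed_lines : List String) (il : Int × String) : List String :=
  let i := il.1
  let line := il.2
  if PySem.Str.startswith line "#" then
    -- `processed_lines[-1]` is guarded by `i > 0` (short-circuit `and`), so the list is nonempty; getD is never the default
    let processed_lines :=
      if i > 0 && ((PySem.List.pyGet? processed_lines (-1)).getD "" != "") then processed_lines ++ [""]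
      else processed_lines
    let processed_lines := processed_lines ++ [line]
    -- `lines[i+1]` is guarded by `i < len(lines) - 1`, so the index is in range; getD is never the default
    if i < (lines.length : Int) - 1 && ((PySem.List.pyGet? lines (i + 1)).getD "" != "") then processed_lines ++ [""]
    else processed_lines
  else processed_lines ++ [line]

def add_newlines_around_hashes (input_string : String) : String :=
  let lines := (PySem.Str.split? input_string "\n").getD []  -- sep "\n" is nonempty, so split? is always some
  let processed_lines : List String := []
  let processed_lines := (PySem.List.enumerate lines 0).foldl (pvStepA lines) processed_lines
  PySem.Str.join "\n" processed_lines

-- ===== PORT B =====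
def pvStepB (st : List String × Option String) (cur : String) : List String × Option String :=
  let out := st.1
  let out :=
    match st.2 with
    | none => out
    | some prev =>
        if prev != "" && cur != "" && (PySem.Str.startswith prev "#" || PySem.Str.startswith cur "#") then out ++ [""]
        else out
  (out ++ [cur], some cur)

def add_newlines_around_hashes_alt (input_string : String) : String :=
  let lines := (PySem.Str.split? input_string "\n").getD []  -- sep "\n" is nonempty, so split? is always some
  let st := lines.foldl pvStepB (([] : List String), (none : Option String))
  PySem.Str.join "\n" st.1

-- ===== PRECONDITION & SPEC =====
def Spec_add_newlines_around_hashes (input_string : String) (out : String) : Prop := out = add_newlines_around_hashes_alt input_string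
instance (input_string : String) (out : String) : Decidable (Spec_add_newlines_around_hashes input_string out) := by unfold Spec_add_newlines_around_hashes; infer_instance

-- ===== CLAIM (what is proved, stated in full; the proofs are below) =====
def Claim_equal_add_newlines_around_hashes : Prop := ∀ (input_string : String), Dom_add_newlines_around_hashes input_string → Spec_add_newlines_around_hashes input_string (add_newlines_around_hashes input_string)

-- ===== LEMMAS AND PROOFS =====

-- abbreviations used only by the proofs
def pvHash (s : String) : Bool := PySem.Str.startswith s "#"

-- "the last processed line is empty" after A has processed p, when the next original line is c
def pvEmptyLast (p c : String) : Bool := p == "" || (pvHash p && c != "")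

-- "A appended a blank after p" when the original lines remaining after p are l
def pvAfter (p : String) (l : List String) : Bool := pvHash p && !l.isEmpty && (l.headD "" != "")

-- the per-boundary condition of B
def pvBnd (p c : String) : Bool := p != "" && c != "" && (pvHash p || pvHash c)

-- the tail (everything after the first line) of A's processed list, as a recursion over (previous line, rest)
def pvTailA (p : String) : List String → List String
  | [] => []
  | c :: rest =>
      (if pvHash c && !(pvEmptyLast p c) then [""] else []) ++ [c] ++
      (if pvAfter c rest then [""] else []) ++ pvTailA c rest

-- the tail of B's out list
def pvTailB (p : String) : List String → List String
  | [] => []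
  | c :: rest => (if pvBnd p c then [""] else []) ++ c :: pvTailB c rest

theorem pvHash_ne_empty {s : String} (h : pvHash s = true) : (s == "") = false := by
  unfold pvHash at h
  simp only [PySem.Str.startswith_eq] at h
  rw [PySem.Chars.startswith_iff] at h
  rcases h with ⟨t, ht⟩
  simp only [beq_eq_false_iff_ne, ne_eq]
  intro he; subst he; simp at ht

theorem pvHash_ne_empty' {s : String} (h : pvHash s = true) : ¬ s = "" := by
  simpa using pvHash_ne_empty h

-- the port's after-blank condition, at index pre.length into pre ++ c :: rest
theorem pvNextCond (pre rest : List String) (c : String) :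
    (decide ((pre.length : Int) < (((pre ++ c :: rest).length : Nat) : Int) - 1) &&
      ((PySem.List.pyGet? (pre ++ c :: rest) ((pre.length : Int) + 1)).getD "" != "")) =
    (!rest.isEmpty && (rest.headD "" != "")) := by
  cases rest with
  | nil => simp
  | cons r rs =>
    have h1 : ((pre.length : Int) + 1) = ((pre.length + 1 : Nat) : Int) := by push_cast; ring
    rw [h1, PySem.List.pyGet?_natCast]
    have h2 : (pre ++ c :: r :: rs)[pre.length + 1]? = some r := by
      rw [List.getElem?_append_right (by omega)]
      simp
    rw [h2]
    simp [List.length_append]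
    omega

-- boundary blanks: A's after-blank of p plus A's before-blank of c is exactly B's single boundary blank
theorem pvBoundary (p c : String) (rest : List String) :
    (if pvAfter p (c :: rest) then ([""] : List String) else []) ++
      (if pvHash c && !(pvEmptyLast p c) then [""] else []) =
    (if pvBnd p c then [""] else []) := by
  unfold pvAfter pvEmptyLast pvBnd
  cases hp : pvHash p <;> cases hc : pvHash c
  · cases hpe : (p == "") <;> cases hce : (c == "") <;> simp_all
  · simp [pvHash_ne_empty' hc]
  · simp [pvHash_ne_empty' hp]
  · simp [pvHash_ne_empty' hp, pvHash_ne_empty' hc]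

theorem pvKey (l : List String) : ∀ (p : String),
    (if pvAfter p l then ([""] : List String) else []) ++ pvTailA p l = pvTailB p l := by
  induction l with
  | nil => intro p; simp [pvTailA, pvTailB, pvAfter]
  | cons c rest ih =>
    intro p
    rw [pvTailA, pvTailB, ← ih c]
    simp only [List.append_assoc]
    rw [← List.append_assoc, pvBoundary]
    simp

-- one step of A's loop, at index pre.length ≥ 1, when the last processed line matches pvEmptyLast p c
theorem pvStepA_eq (pre acc : List String) (p c : String) (rest : List String)
    (hpre : pre ≠ [])
    (hlast : ((acc.getLast?.getD "" == "")) = pvEmptyLast p c) :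
    pvStepA (pre ++ c :: rest) acc ((pre.length : Int), c) =
      acc ++ ((if pvHash c && !(pvEmptyLast p c) then [""] else []) ++ [c] ++
        (if pvAfter c rest then [""] else [])) := by
  unfold pvStepA
  simp only [PySem.List.pyGet?_neg_one, gt_iff_lt]
  have h0 : decide ((0:Int) < (pre.length : Int)) = true := by
    simp only [decide_eq_true_eq]
    exact_mod_cast List.length_pos_iff.mpr hpre
  have hb : (decide ((0:Int) < (pre.length : Int)) && (acc.getLast?.getD "" != "")) = !pvEmptyLast p c := by
    rw [h0, Bool.true_and, ← hlast]
    simp [bne]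
  rw [hb, pvNextCond pre rest c]
  cases hc : PySem.Str.startswith c "#" <;> cases hEL : pvEmptyLast p c <;>
    cases hN : (!rest.isEmpty && (rest.headD "" != "")) <;>
    simp_all [pvHash, pvAfter]

-- after emitting c (and its possible after-blank), the last processed line matches pvEmptyLast c c'
theorem pvLastAfter (ys : List String) (c : String) (rest : List String) :
    ∀ c' rest', rest = c' :: rest' →
    (((ys ++ [c] ++ (if pvAfter c rest then [""] else [])).getLast?.getD "" == "")) = pvEmptyLast c c' := by
  intro c' rest' hr
  subst hr
  cases hA : pvAfter c (c' :: rest') with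
  | true =>
      have : pvEmptyLast c c' = true := by
        unfold pvAfter at hA
        unfold pvEmptyLast
        simp only [List.isEmpty_cons, Bool.not_false, Bool.and_true, List.headD_cons] at hA
        rcases Bool.and_eq_true_iff.mp hA with ⟨h1, h2⟩
        simp [h1, h2]
      simp [this, List.getLast?_append]
  | false =>
      have hEL : pvEmptyLast c c' = (c == "") := by
        unfold pvAfter at hA
        unfold pvEmptyLast
        simp only [List.isEmpty_cons, Bool.not_false, Bool.and_true, List.headD_cons] at hA
        simp [hA]
      simp [hEL, List.getLast?_append]

theorem pvLoopA (l : List String) : ∀ (pre acc : List String) (p : String),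
    pre ≠ [] →
    (∀ c rest, l = c :: rest → ((acc.getLast?.getD "" == "")) = pvEmptyLast p c) →
    (PySem.List.enumerate l (pre.length : Int)).foldl (pvStepA (pre ++ l)) acc = acc ++ pvTailA p l := by
  induction l with
  | nil => intro pre acc p _ _; simp [PySem.List.enumerate_nil, pvTailA]
  | cons c rest ih =>
    intro pre acc p hpre hinv
    have hstep := pvStepA_eq pre acc p c rest hpre (hinv c rest rfl)
    rw [PySem.List.enumerate_cons, List.foldl_cons, hstep]
    have hcast : ((pre.length : Int) + 1) = (((pre ++ [c]).length : Nat) : Int) := by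
      push_cast [List.length_append]; simp
    have happ : pre ++ c :: rest = (pre ++ [c]) ++ rest := by simp
    rw [hcast, happ]
    rw [ih (pre ++ [c]) _ c (by simp) ?_]
    · rw [pvTailA]
      simp [List.append_assoc]
    · intro c' rest' hr
      have := pvLastAfter (acc ++ (if pvHash c && !(pvEmptyLast p c) then [""] else [])) c rest c' rest' hr
      simpa [List.append_assoc] using this

theorem pvLoopB (l : List String) : ∀ (out : List String) (p : String),
    l.foldl pvStepB (out, some p) = (out ++ pvTailB p l, some (l.getLastD p)) := by
  induction l with
  | nil => intro out p; simp [pvTailB]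
  | cons c rest ih =>
    intro out p
    have hstep : pvStepB (out, some p) c =
        (out ++ ((if pvBnd p c then [""] else []) ++ [c]), some c) := by
      unfold pvStepB pvBnd pvHash
      split_ifs with h <;> simp_all
    rw [List.foldl_cons, hstep, ih]
    simp only [pvTailB, List.append_assoc, Prod.mk.injEq]
    constructor
    · rfl
    · cases rest with
      | nil => simp
      | cons h t =>
          cases hl : (h :: t).getLast? with
          | none => simp [List.getLast?_eq_none_iff] at hl
          | some v => simp [hl]

-- the first step of A's loop (index 0: no before-blank)
theorem pvStepA_zero (h : String) (t : List String) :
    pvStepA (h :: t) [] ((0 : Int), h) = [h] ++ (if pvAfter h t then [""] else []) := by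
  unfold pvStepA
  simp only [PySem.List.pyGet?_neg_one]
  cases t with
  | nil =>
      cases hh : PySem.Str.startswith h "#" <;> simp [pvAfter, pvHash]
  | cons c rest =>
      have h1 : PySem.List.pyGet? (h :: c :: rest) ((0:Int) + 1) = some c := by
        rw [show ((0:Int) + 1) = ((1 : Nat) : Int) by norm_num, PySem.List.pyGet?_natCast]
        rfl
      rw [h1]
      have h2 : decide ((0:Int) < ((h :: c :: rest).length : Int) - 1) = true := by
        simp only [List.length_cons, decide_eq_true_eq]
        push_cast
        omega
      rw [h2]
      cases hh : PySem.Str.startswith h "#" <;>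
        cases hc : (c == "") <;>
        simp_all [pvAfter, pvHash, bne]

theorem pvMain (lines : List String) :
    (PySem.List.enumerate lines 0).foldl (pvStepA lines) [] =
    (lines.foldl pvStepB ([], none)).1 := by
  cases lines with
  | nil => simp [PySem.List.enumerate_nil]
  | cons h t =>
    -- B side: the first iteration has prev = None and only appends h
    have hB : (h :: t).foldl pvStepB ([], none) = (([h] ++ pvTailB h t, some (t.getLastD h)) : List String × Option String) := by
      rw [List.foldl_cons, show pvStepB ([], none) h = (([h] : List String), some h) from rfl, pvLoopB]
    -- A side: the first iteration emits h and its possible after-blank, then the loop runs from index 1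
    have hA : (PySem.List.enumerate (h :: t) 0).foldl (pvStepA (h :: t)) [] =
        ([h] ++ (if pvAfter h t then [""] else [])) ++ pvTailA h t := by
      rw [PySem.List.enumerate_cons, List.foldl_cons, pvStepA_zero]
      have hcast : ((0 : Int) + 1) = ((([h] : List String).length : Nat) : Int) := by simp
      rw [hcast]
      have := pvLoopA t [h] ([h] ++ (if pvAfter h t then [""] else [])) h (by simp) ?_
      · simpa using this
      · intro c rest hr
        exact pvLastAfter [] h t c rest hr
    rw [hA, hB, List.append_assoc, pvKey t h]

-- ===== VERDICT (by name: the statement is the Claim_ definition above) =====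
theorem add_newlines_around_hashes_spec : Claim_equal_add_newlines_around_hashes := by
  intro s _
  unfold Spec_add_newlines_around_hashes add_newlines_around_hashes add_newlines_around_hashes_alt
  simp only []
  rw [pvMain]
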